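-- pv_equiv track=rewrite | github.com/vapene/TAPTAP_mcp | run/IRT/GD/preprocessing_ethicsNphilosophy.py | generate_balanced_combinations
-- ===== SOURCE A (Python) =====
-- import itertools
--
-- def generate_balanced_combinations(items, count):
--     if len(items) >= count:
--         return list(itertools.combinations(items, count))
--     else:
--         base_combinations = list(itertools.combinations_with_replacement(items, count))
--         valid_combinations = []
--         for combo in base_combinations:
--             if all(combo.count(item) <= 2 for item in items):
--                 valid_combinations.append(combo)
--         return valid_combinations
-- ===== SOURCE B (Python) =====
-- def generate_balanced_combinations(items, count):
--     n = len(items)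
--     out = []
--     if n >= count:
--         # backtracking enumeration of index-increasing combinations
--         def choose(i, k, acc):
--             if k == 0:
--                 out.append(tuple(acc))
--                 return
--             if n - i < k:
--                 return
--             acc.append(items[i])
--             choose(i + 1, k - 1, acc)
--             acc.pop()
--             choose(i + 1, k, acc)
--         choose(0, count, [])
--     else:
--         # backtracking enumeration of valid multisets, pruning branches
--         # whose value already occurs twice (so no generate-then-filter pass)
--         def walk(i, k, acc):
--             if k == 0:
--                 out.append(tuple(acc))
--                 return
--             if i == n or k > 2 * (n - i):
--                 return
--             v = items[i]
--             if acc.count(v) < 2: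
--                 acc.append(v)
--                 walk(i, k - 1, acc)
--                 acc.pop()
--             walk(i + 1, k, acc)
--         walk(0, count, [])
--     return out
-- ===== Notes on version B (the rewrite author's own statement) =====
-- stated objective: faster
-- what changed: Replaces itertools generate-then-filter (enumerate all combinations_with_replacement, then filter each by counting every item) with a backtracking enumeration that prunes a branch as soon as a value would appear a third time (and when the remaining capacity 2*(n-i) cannot reach count), so only valid multisets are ever built.
import Mathlib
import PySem

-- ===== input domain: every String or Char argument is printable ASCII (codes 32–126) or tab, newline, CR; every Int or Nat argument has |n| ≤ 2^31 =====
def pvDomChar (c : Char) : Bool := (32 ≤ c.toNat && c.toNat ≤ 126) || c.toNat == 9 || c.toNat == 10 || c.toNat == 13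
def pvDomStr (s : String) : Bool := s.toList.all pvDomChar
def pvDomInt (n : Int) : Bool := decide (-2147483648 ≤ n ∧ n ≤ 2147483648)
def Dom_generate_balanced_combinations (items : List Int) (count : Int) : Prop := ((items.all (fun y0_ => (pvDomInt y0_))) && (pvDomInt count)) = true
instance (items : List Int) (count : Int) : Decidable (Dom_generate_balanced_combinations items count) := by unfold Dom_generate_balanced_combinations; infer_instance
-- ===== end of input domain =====

-- B prunes invalid branches during enumeration instead of A's generate-then-filter pass (faster).

-- ===== PORT A =====
-- itertools.combinations(xs, r), ported as the standard structural recursion (lex order, by position)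
def pvCombos : List Int → Nat → List (List Int)
  | _, 0 => [[]]
  | [], _ + 1 => []
  | x :: xs, r + 1 => (pvCombos xs r).map (x :: ·) ++ pvCombos xs (r + 1)

-- itertools.combinations_with_replacement(xs, r), ported as the standard structural recursion
def pvCwr : List Int → Nat → List (List Int)
  | _, 0 => [[]]
  | [], _ + 1 => []
  | x :: xs, r + 1 => (pvCwr (x :: xs) r).map (x :: ·) ++ pvCwr xs (r + 1)
  termination_by xs r => (xs.length, r)

def generate_balanced_combinations (items : List Int) (count : Int) : List (List Int) :=
  if (items.length : Int) ≥ count then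
    pvCombos items count.toNat
  else
    let base := pvCwr items count.toNat
    -- 'for combo in base: if all(combo.count(item) <= 2 for item in items): valid.append(combo)'
    base.foldl (fun acc combo =>
      if items.all (fun item => decide (PySem.List.count combo item ≤ 2)) then acc ++ [combo]
      else acc) []

-- ===== PORT B =====
def pvChoose (items : List Int) (n : Nat) (i k : Nat) (acc : List Int) : List (List Int) :=
  if k = 0 then [acc]
  else if n - i < k then []
  else
    pvChoose items n (i + 1) (k - 1) (acc ++ [items.getD i 0]) ++ pvChoose items n (i + 1) k acc
  termination_by n - i
  decreasing_by all_goals omega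

def pvWalk (items : List Int) (n : Nat) (i k : Nat) (acc : List Int) : List (List Int) :=
  if k = 0 then [acc]
  else if i = n ∨ (k : Int) > 2 * ((n : Int) - (i : Int)) then []
  else
    let v := items.getD i 0
    (if PySem.List.count acc v < 2 then pvWalk items n i (k - 1) (acc ++ [v]) else []) ++
      pvWalk items n (i + 1) k acc
  termination_by (n - i) + k
  decreasing_by all_goals omega

def generate_balanced_combinations_alt (items : List Int) (count : Int) : List (List Int) :=
  let n := items.length
  if (n : Int) ≥ count then pvChoose items n 0 count.toNat []
  else pvWalk items n 0 count.toNat []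

-- ===== PRECONDITION & SPEC =====
-- Pre_ excludes count < 0, on which Python's itertools.combinations raises ValueError.
def Pre_generate_balanced_combinations (items : List Int) (count : Int) : Prop := 0 ≤ count
instance (items : List Int) (count : Int) : Decidable (Pre_generate_balanced_combinations items count) := by unfold Pre_generate_balanced_combinations; infer_instance
def pvWitness_generate_balanced_combinations : List Int × Int := ([1, 2], 1)

def Spec_generate_balanced_combinations (items : List Int) (count : Int) (out : List (List Int)) : Prop := out = generate_balanced_combinations_alt items count
instance (items : List Int) (count : Int) (out : List (List Int)) : Decidable (Spec_generate_balanced_combinations items count out) := by unfold Spec_generate_balanced_combinations; infer_instance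

-- ===== CLAIM (what is proved, stated in full; the proofs are below) =====
def Claim_equal_generate_balanced_combinations : Prop := ∀ (items : List Int) (count : Int), Dom_generate_balanced_combinations items count → Pre_generate_balanced_combinations items count → Spec_generate_balanced_combinations items count (generate_balanced_combinations items count)

-- ===== LEMMAS AND PROOFS =====

theorem pvCombos_nil_of_lt (xs : List Int) : ∀ r, xs.length < r → pvCombos xs r = [] := by
  induction xs with
  | nil => intro r hr; cases r with
    | zero => omega
    | succ r => rfl
  | cons x xs ih =>
    intro r hr
    cases r with
    | zero => omega
    | succ r =>
      simp only [pvCombos, ih r (by simpa using hr), ih (r + 1) (by simp at hr ⊢; omega)]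
      rfl

theorem pvChoose_eq (items : List Int) (i k : Nat) (acc : List Int) :
    pvChoose items items.length i k acc = (pvCombos (items.drop i) k).map (acc ++ ·) := by
  fun_induction pvChoose items items.length i k acc with
  | case1 =>
    simp [pvCombos]
  | case2 i k acc hk hlt =>
    rw [pvCombos_nil_of_lt _ k (by simp; omega)]
    rfl
  | case3 i k acc hk hlt ih1 ih2 =>
    have hi : i < items.length := by omega
    have hdrop : items.drop i = items[i] :: items.drop (i + 1) := List.drop_eq_getElem_cons hi
    obtain ⟨k', rfl⟩ : ∃ k', k = k' + 1 := ⟨k - 1, by omega⟩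
    rw [ih1, ih2, hdrop]
    simp [pvCombos, List.getElem?_eq_getElem hi, Function.comp_def]
theorem mem_pvCwr (xs : List Int) (r : Nat) : ∀ c ∈ pvCwr xs r, c.length = r ∧ ∀ v ∈ c, v ∈ xs := by
  fun_induction pvCwr xs r with
  | case1 => simp [pvCwr]
  | case2 => simp [pvCwr]
  | case3 x xs r ih1 ih2 =>
    intro c hc
    simp only [List.mem_append, List.mem_map] at hc
    rcases hc with ⟨c', hc', rfl⟩ | hc
    · obtain ⟨h1, h2⟩ := ih1 c' hc'
      refine ⟨by simp [h1], ?_⟩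
      intro v hv
      rcases List.mem_cons.mp hv with rfl | hv
      · exact List.mem_cons_self
      · exact h2 v hv
    · obtain ⟨h1, h2⟩ := ih2 c hc
      exact ⟨h1, fun v hv => List.mem_cons_of_mem _ (h2 v hv)⟩
theorem length_le_of_count_le : ∀ (xs c : List Int), (∀ v ∈ c, v ∈ xs) →
    (∀ v, c.count v ≤ 2) → c.length ≤ 2 * xs.length := by
  intro xs
  induction xs with
  | nil =>
    intro c hsub _
    have : c = [] := List.eq_nil_iff_forall_not_mem.mpr (by intro v hv; exact absurd (hsub v hv) (by simp))
    simp [this]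
  | cons x xs ih =>
    intro c hsub hcnt
    have hlen : c.length = (c.filter (· == x)).length + (c.filter (fun v => !(v == x))).length :=
      List.length_eq_length_filter_add _
    have h1 : (c.filter (· == x)).length ≤ 2 := by
      rw [← List.count_eq_length_filter]
      exact hcnt x
    have h2 : (c.filter (fun v => !(v == x))).length ≤ 2 * xs.length := by
      apply ih
      · intro v hv
        have hm := List.mem_filter.mp hv
        rcases List.mem_cons.mp (hsub v hm.1) with rfl | h
        · simp at hm
        · exact h
      · intro v
        calc (c.filter (fun v => !(v == x))).count v ≤ c.count v := List.Sublist.count_le v List.filter_sublist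
          _ ≤ 2 := hcnt v
    simp only [List.length_cons]
    omega

def pvGood (acc c : List Int) : Bool := c.all (fun v => decide (acc.count v + c.count v ≤ 2))

theorem pvGood_cons (acc c : List Int) (v : Int) :
    pvGood acc (v :: c) = true ↔ acc.count v < 2 ∧ pvGood (acc ++ [v]) c = true := by
  simp only [pvGood, List.all_eq_true, List.mem_cons, List.count_cons, List.count_append,
    List.count_singleton, decide_eq_true_eq]
  constructor
  · intro h
    refine ⟨?_, ?_⟩
    · have := h v (Or.inl rfl)
      simp at this
      omega
    · intro u hu
      have := h u (Or.inr hu)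
      by_cases huv : u = v <;> simp [huv] at this ⊢ <;> omega
  · rintro ⟨h1, h2⟩ u hu
    rcases hu with huv | hu
    · subst huv
      by_cases hvc : u ∈ c
      · have := h2 u hvc
        simp at this ⊢
        omega
      · have : c.count u = 0 := List.count_eq_zero.mpr hvc
        simp [this]
        omega
    · have := h2 u hu
      by_cases huv : u = v <;> simp [huv] at this ⊢ <;> omega
theorem good_of_mem {acc c : List Int} (h : pvGood acc c = true) : ∀ v, c.count v ≤ 2 := by
  intro v
  by_cases hv : v ∈ c
  · have := (List.all_eq_true.mp h) v hv
    simp at this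
    omega
  · simp [List.count_eq_zero.mpr hv]

theorem pvWalk_eq (items : List Int) (i k : Nat) (acc : List Int) :
    pvWalk items items.length i k acc = ((pvCwr (items.drop i) k).filter (pvGood acc)).map (acc ++ ·) := by
  fun_induction pvWalk items items.length i k acc with
  | case1 => simp [pvCwr, pvGood]
  | case2 i k acc hk hguard =>
    obtain ⟨k', rfl⟩ : ∃ k', k = k' + 1 := ⟨k - 1, by omega⟩
    by_cases hin : items.length ≤ i
    · rw [List.drop_eq_nil_of_le hin]
      simp [pvCwr]
    · have hki : (↑(k' + 1) : Int) > 2 * (↑items.length - ↑i) := by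
        rcases hguard with h | h
        · omega
        · exact h
      have hk2 : k' + 1 > 2 * (items.length - i) := by omega
      rw [show (pvCwr (items.drop i) (k' + 1)).filter (pvGood acc) = [] from ?_]
      · rfl
      · rw [List.filter_eq_nil_iff]
        intro c hc hg
        obtain ⟨hlen, hsub⟩ := mem_pvCwr _ _ c hc
        have := length_le_of_count_le (items.drop i) c hsub (good_of_mem hg)
        rw [hlen, List.length_drop] at this
        omega
  | case3 i k acc hk hguard v ih1 ih2 =>
    have hi : i < items.length := by
      by_contra hin
      refine hguard (Or.inr ?_)
      push_neg at hin
      have : (items.length : Int) ≤ i := by exact_mod_cast hin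
      have hk1 : 1 ≤ (k : Int) := by exact_mod_cast Nat.one_le_iff_ne_zero.mpr hk
      omega
    obtain ⟨k', rfl⟩ : ∃ k', k = k' + 1 := ⟨k - 1, by omega⟩
    have hdrop : items.drop i = items[i] :: items.drop (i + 1) := List.drop_eq_getElem_cons hi
    have hv : v = items[i] := by
      simp [v, List.getD, List.getElem?_eq_getElem hi]
    rw [hv] at ih1 ⊢
    rw [hdrop, pvCwr, List.filter_append, List.map_append, List.filter_map]
    simp only [PySem.List.count_eq, Nat.add_sub_cancel] at *
    by_cases hcv : List.count items[i] acc < 2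
    · rw [if_pos hcv, ih1, ih2, hdrop]
      congr 1
      have hfc : ∀ c ∈ pvCwr (items[i] :: items.drop (i + 1)) k',
          (pvGood acc ∘ (items[i] :: ·)) c = pvGood (acc ++ [items[i]]) c := by
        intro c _
        simp only [Function.comp_apply]
        rcases hb : pvGood (acc ++ [items[i]]) c with _ | _
        · rw [Bool.eq_false_iff]
          intro hcon
          have h2 := ((pvGood_cons acc c items[i]).mp hcon).2
          rw [hb] at h2
          exact Bool.false_ne_true h2
        · exact (pvGood_cons acc c items[i]).mpr ⟨hcv, hb⟩
      rw [List.filter_congr hfc, List.map_map]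
      apply List.map_congr_left
      intro c _
      simp
    · rw [if_neg hcv]
      rw [show (pvCwr (items[i] :: items.drop (i + 1)) k').filter (pvGood acc ∘ (items[i] :: ·)) = [] from ?_]
      · simpa using ih2
      · rw [List.filter_eq_nil_iff]
        intro c hc
        simp only [Function.comp_apply]
        intro hcon
        exact hcv ((pvGood_cons acc c items[i]).mp hcon).1
theorem gen_eq : ∀ (items : List Int) (count : Int), 0 ≤ count →
    generate_balanced_combinations items count = generate_balanced_combinations_alt items count := by
  intro items count hpre
  unfold generate_balanced_combinations generate_balanced_combinations_alt
  by_cases h : (items.length : Int) ≥ count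
  · rw [if_pos h, if_pos h, pvChoose_eq]
    simp
  · rw [if_neg h, if_neg h, pvWalk_eq]
    rw [PySem.List.foldl_append_if_eq_filter]
    simp only [List.drop_zero, List.nil_append, List.map_id', List.map_id]
    have : ∀ c ∈ pvCwr items count.toNat,
        (items.all fun item => decide (PySem.List.count c item ≤ 2)) = pvGood [] c := by
      intro c hc
      obtain ⟨_, hsub⟩ := mem_pvCwr _ _ c hc
      rw [Bool.eq_iff_iff]
      simp only [List.all_eq_true, decide_eq_true_eq, pvGood, PySem.List.count_eq,
        List.count_nil, Nat.zero_add]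
      constructor
      · intro hall v hv
        exact hall v (hsub v hv)
      · intro hall item _
        by_cases hic : item ∈ c
        · exact hall item hic
        · simp [List.count_eq_zero.mpr hic]
    rw [List.filter_congr this]

-- ===== VERDICT (by name: the statement is the Claim_ definition above) =====
theorem generate_balanced_combinations_spec : Claim_equal_generate_balanced_combinations := by
  intro items count _dom hpre
  unfold Spec_generate_balanced_combinations
  exact gen_eq items count hpre
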